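-- pv_equiv track=rewrite | github.com/dalves/secretsanta | santa.py | gen_edges
-- ===== SOURCE A (Python) =====
-- from itertools import chain, combinations, product
--
-- def gen_edges(people, groups):
--     disallowed = set()
--     for g in groups:
--         for p in g:
--             disallowed.add((p, p))
--         for a, b in combinations(g, 2):
--             disallowed.add((a, b))
--             disallowed.add((b, a))
--
--     edges = [x for x in product(people, repeat=2) if x not in disallowed]
--     return edges
-- ===== SOURCE B (Python) =====
-- def gen_edges(people, groups):
--     mem = {}
--     for i, g in enumerate(groups):
--         for p in g:
--             mem.setdefault(p, set()).add(i)
--     empty = set()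
--     return [(a, b) for a in people for b in people
--             if mem.get(a, empty).isdisjoint(mem.get(b, empty))]
-- ===== Notes on version B (the rewrite author's own statement) =====
-- stated objective: alternative
-- what changed: B replaces A's precomputed set of disallowed ordered pairs (self-pairs plus both orders of every within-group combination) with a person-to-group-indices index built in one pass, deciding each pair by set-disjointness of the two membership sets.
import Mathlib
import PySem

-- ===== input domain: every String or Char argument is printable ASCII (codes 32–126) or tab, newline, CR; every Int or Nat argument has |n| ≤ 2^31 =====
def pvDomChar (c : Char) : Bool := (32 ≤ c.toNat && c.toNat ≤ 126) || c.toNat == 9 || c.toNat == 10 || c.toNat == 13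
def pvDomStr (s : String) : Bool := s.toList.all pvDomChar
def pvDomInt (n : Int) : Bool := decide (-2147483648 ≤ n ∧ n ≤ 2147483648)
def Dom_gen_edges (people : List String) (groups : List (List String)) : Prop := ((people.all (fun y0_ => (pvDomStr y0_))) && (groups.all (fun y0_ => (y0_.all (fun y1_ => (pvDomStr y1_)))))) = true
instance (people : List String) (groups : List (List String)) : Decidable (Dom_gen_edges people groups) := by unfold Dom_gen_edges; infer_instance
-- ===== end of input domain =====

-- B builds a person→group-indices index and tests pairs by set-disjointness instead of
-- A's precomputed set of disallowed ordered pairs; alternative structure, same results.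

-- ===== PORT A =====
-- itertools.combinations(g, 2), in Python's order
def pvComb2 (g : List String) : List (String × String) :=
  match g with
  | [] => []
  | x :: xs => xs.map (fun y => (x, y)) ++ pvComb2 xs

-- the loop body for one group g: add (p,p) for p in g, then both orders of each combination
def pvDisStep (s : PySem.Set (String × String)) (g : List String) : PySem.Set (String × String) :=
  let s1 := g.foldl (fun s p => PySem.Set.add s (p, p)) s
  (pvComb2 g).foldl (fun s q => PySem.Set.add (PySem.Set.add s (q.1, q.2)) (q.2, q.1)) s1

def gen_edges (people : List String) (groups : List (List String)) : List (String × String) :=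
  let disallowed := groups.foldl pvDisStep PySem.Set.empty
  (people.flatMap (fun a => people.map (fun b => (a, b)))).filter
    (fun x => !(PySem.Set.contains disallowed x))

-- ===== PORT B =====
-- mem.setdefault(p, set()).add(i)  ==  mem[p] = mem.get(p, set()) ∪ {i}  ==  Dict.modify
def pvBuildMem (groups : List (List String)) : PySem.Dict String (PySem.Set Int) :=
  (PySem.List.enumerate groups 0).foldl
    (fun d ig => ig.2.foldl (fun d p => d.modify p PySem.Set.empty (fun s => PySem.Set.add s ig.1)) d)
    PySem.Dict.empty

def gen_edges_alt (people : List String) (groups : List (List String)) : List (String × String) :=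
  let mem := pvBuildMem groups
  people.flatMap (fun a =>
    (people.filter (fun b =>
      PySem.Set.isdisjoint (mem.getD a PySem.Set.empty) (mem.getD b PySem.Set.empty))).map
      (fun b => (a, b)))

-- ===== PRECONDITION & SPEC =====
def Spec_gen_edges (people : List String) (groups : List (List String)) (out : List (String × String)) : Prop := out = gen_edges_alt people groups
instance (people : List String) (groups : List (List String)) (out : List (String × String)) : Decidable (Spec_gen_edges people groups out) := by unfold Spec_gen_edges; infer_instance

-- ===== CLAIM (what is proved, stated in full; the proofs are below) =====
def Claim_equal_gen_edges : Prop := ∀ (people : List String) (groups : List (List String)), Dom_gen_edges people groups → Spec_gen_edges people groups (gen_edges people groups)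

-- ===== LEMMAS AND PROOFS =====

-- membership in pvComb2, both orders, vs joint membership in g
lemma mem_comb2_iff (g : List String) (a b : String) :
    ((a, b) ∈ pvComb2 g ∨ (b, a) ∈ pvComb2 g ∨ (a = b ∧ a ∈ g)) ↔ (a ∈ g ∧ b ∈ g) := by
  induction g with
  | nil => simp [pvComb2]
  | cons x xs ih =>
    simp only [pvComb2, List.mem_append, List.mem_map, List.mem_cons, Prod.mk.injEq]
    constructor
    · rintro ((⟨y, hy, hx, hby⟩ | h) | (⟨y, hy, hx, hay⟩ | h) | ⟨hab, (h | h)⟩)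
      · exact ⟨Or.inl hx.symm, Or.inr (hby ▸ hy)⟩
      · exact ⟨Or.inr (ih.mp (Or.inl h)).1, Or.inr (ih.mp (Or.inl h)).2⟩
      · exact ⟨Or.inr (hay ▸ hy), Or.inl hx.symm⟩
      · exact ⟨Or.inr (ih.mp (Or.inr (Or.inl h))).1, Or.inr (ih.mp (Or.inr (Or.inl h))).2⟩
      · exact ⟨Or.inl h, Or.inl (hab ▸ h)⟩
      · exact ⟨Or.inr h, Or.inr (hab ▸ h)⟩
    · rintro ⟨(ha | ha), (hb | hb)⟩
      · exact Or.inr (Or.inr ⟨ha.trans hb.symm, Or.inl ha⟩)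
      · exact Or.inl (Or.inl ⟨b, hb, ha.symm, rfl⟩)
      · exact Or.inr (Or.inl (Or.inl ⟨a, ha, hb.symm, rfl⟩))
      · rcases (ih.mpr ⟨ha, hb⟩) with h | h | ⟨hab, h⟩
        · exact Or.inl (Or.inr h)
        · exact Or.inr (Or.inl (Or.inr h))
        · exact Or.inr (Or.inr ⟨hab, Or.inr h⟩)

lemma mem_foldl_add2 (l : List (String × String)) (s : PySem.Set (String × String)) (y : String × String) :
    y ∈ l.foldl (fun s q => PySem.Set.add (PySem.Set.add s (q.1, q.2)) (q.2, q.1)) s ↔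
      y ∈ s ∨ ∃ q ∈ l, y = (q.1, q.2) ∨ y = (q.2, q.1) := by
  induction l generalizing s with
  | nil => simp
  | cons q l ih =>
    simp only [List.foldl_cons, ih, PySem.Set.mem_add, List.mem_cons]
    aesop

lemma mem_disStep (s : PySem.Set (String × String)) (g : List String) (a b : String) :
    (a, b) ∈ pvDisStep s g ↔ (a, b) ∈ s ∨ (a ∈ g ∧ b ∈ g) := by
  unfold pvDisStep
  rw [mem_foldl_add2]
  rw [show (g.foldl (fun s p => PySem.Set.add s (p, p)) s)
        = g.foldl (fun s p => PySem.Set.add s ((fun p => (p, p)) p)) s from rfl,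
      PySem.Set.mem_foldl_add]
  rw [← mem_comb2_iff g a b]
  constructor
  · rintro ((h | ⟨p, hp, hpp⟩) | ⟨q, hq, (h | h)⟩)
    · exact Or.inl h
    · rw [Prod.mk.injEq] at hpp
      obtain ⟨rfl, h2⟩ := hpp
      exact Or.inr (Or.inr (Or.inr ⟨h2.symm, hp⟩))
    · exact Or.inr (Or.inl (h ▸ hq))
    · exact Or.inr (Or.inr (Or.inl (by cases q; cases h; exact hq)))
  · rintro (h | h | h | ⟨hab, ha⟩)
    · exact Or.inl (Or.inl h)
    · exact Or.inr ⟨(a, b), h, Or.inl rfl⟩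
    · exact Or.inr ⟨(b, a), h, Or.inr rfl⟩
    · exact Or.inl (Or.inr ⟨a, ha, by cases hab; rfl⟩)

-- characterisation of A's disallowed set
lemma mem_disallowed (groups : List (List String)) (a b : String) :
    (a, b) ∈ groups.foldl pvDisStep PySem.Set.empty ↔ ∃ g ∈ groups, a ∈ g ∧ b ∈ g := by
  suffices h : ∀ (s : PySem.Set (String × String)),
      (a, b) ∈ groups.foldl pvDisStep s ↔ (a, b) ∈ s ∨ ∃ g ∈ groups, a ∈ g ∧ b ∈ g by
    rw [h]; simp [PySem.Set.empty]
  induction groups with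
  | nil => intro s; simp
  | cons g gs ih =>
    intro s
    simp only [List.foldl_cons, ih, mem_disStep, List.mem_cons]
    constructor
    · rintro ((h | h) | ⟨g', hg', h⟩)
      · exact Or.inl h
      · exact Or.inr ⟨g, Or.inl rfl, h⟩
      · exact Or.inr ⟨g', Or.inr hg', h⟩
    · rintro (h | ⟨g', (rfl | hg'), h⟩)
      · exact Or.inl (Or.inl h)
      · exact Or.inl (Or.inr h)
      · exact Or.inr ⟨g', hg', h⟩

-- the inner loop of pvBuildMem
lemma mem_inner (g : List String) (d : PySem.Dict String (PySem.Set Int)) (j : Int) (p : String) (i : Int) :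
    i ∈ (g.foldl (fun d p => d.modify p PySem.Set.empty (fun s => PySem.Set.add s j)) d).getD p PySem.Set.empty ↔
      i ∈ d.getD p PySem.Set.empty ∨ (i = j ∧ p ∈ g) := by
  induction g generalizing d with
  | nil => simp
  | cons x xs ih =>
    simp only [List.foldl_cons, ih, List.mem_cons, PySem.Dict.getD_modify]
    by_cases hpx : p = x
    · subst hpx
      simp [PySem.Set.mem_add]
      tauto
    · simp [hpx]

-- characterisation of B's membership index
lemma mem_buildMem (groups : List (List String)) (p : String) (i : Int) :
    i ∈ (pvBuildMem groups).getD p PySem.Set.empty ↔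
      ∃ (k : Nat), ∃ (h : k < groups.length), i = (k : Int) ∧ p ∈ groups[k] := by
  unfold pvBuildMem
  suffices h : ∀ (s : Int) (d : PySem.Dict String (PySem.Set Int)),
      i ∈ ((PySem.List.enumerate groups s).foldl
        (fun d ig => ig.2.foldl (fun d p => d.modify p PySem.Set.empty (fun s => PySem.Set.add s ig.1)) d) d).getD p PySem.Set.empty ↔
      i ∈ d.getD p PySem.Set.empty ∨ ∃ (k : Nat), ∃ (h : k < groups.length), i = s + (k : Int) ∧ p ∈ groups[k] by
    rw [h 0 PySem.Dict.empty]
    simp [PySem.Dict.getD_empty, PySem.Set.empty]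
  induction groups with
  | nil => intro s d; simp [PySem.List.enumerate_nil]
  | cons g gs ih =>
    intro s d
    rw [PySem.List.enumerate_cons]
    simp only [List.foldl_cons, ih, mem_inner, List.length_cons]
    constructor
    · rintro ((h | ⟨rfl, hg⟩) | ⟨k, hk, rfl, hmem⟩)
      · exact Or.inl h
      · exact Or.inr ⟨0, by omega, by simp, hg⟩
      · refine Or.inr ⟨k + 1, by omega, by push_cast; ring, ?_⟩
        simpa using hmem
    · rintro (h | ⟨k, hk, rfl, hmem⟩)
      · exact Or.inl (Or.inl h)
      · match k with
        | 0 => exact Or.inl (Or.inr ⟨by simp, by simpa using hmem⟩)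
        | k + 1 =>
          refine Or.inr ⟨k, by omega, by push_cast; ring, by simpa using hmem⟩

-- the two pair tests agree
lemma test_eq (groups : List (List String)) (a b : String) :
    (!(PySem.Set.contains (groups.foldl pvDisStep PySem.Set.empty) (a, b))) =
      PySem.Set.isdisjoint ((pvBuildMem groups).getD a PySem.Set.empty)
        ((pvBuildMem groups).getD b PySem.Set.empty) := by
  have hA : PySem.Set.contains (groups.foldl pvDisStep PySem.Set.empty) (a, b) = true ↔
      ∃ g ∈ groups, a ∈ g ∧ b ∈ g := by
    rw [PySem.Set.contains_iff, mem_disallowed]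
  have hB : PySem.Set.isdisjoint ((pvBuildMem groups).getD a PySem.Set.empty)
      ((pvBuildMem groups).getD b PySem.Set.empty) = true ↔
      ¬ ∃ g ∈ groups, a ∈ g ∧ b ∈ g := by
    rw [PySem.Set.isdisjoint_iff]
    constructor
    · rintro h ⟨g, hg, ha, hb⟩
      obtain ⟨k, hk, rfl⟩ := List.mem_iff_getElem.mp hg
      exact h (k : Int) ((mem_buildMem groups a k).mpr ⟨k, hk, rfl, ha⟩)
        ((mem_buildMem groups b k).mpr ⟨k, hk, rfl, hb⟩)
    · intro h i hia hib
      obtain ⟨k, hk, hik, ha⟩ := (mem_buildMem groups a i).mp hia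
      obtain ⟨k', hk', hik', hb⟩ := (mem_buildMem groups b i).mp hib
      have hkq : k' = k := by omega
      subst hkq
      exact h ⟨groups[k'], List.getElem_mem hk, ha, hb⟩
  cases hc : PySem.Set.contains (groups.foldl pvDisStep PySem.Set.empty) (a, b) with
  | true =>
    simp only [Bool.not_true]
    exact (Bool.eq_false_iff.mpr (fun hb' => (hB.mp hb') (hA.mp hc))).symm
  | false =>
    simp only [Bool.not_false]
    exact (hB.mpr (fun he => by rw [hA.mpr he] at hc; exact Bool.true_eq_false.mp hc)).symm

-- ===== VERDICT (by name: the statement is the Claim_ definition above) =====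
theorem gen_edges_spec : Claim_equal_gen_edges := by
  intro people groups _
  unfold Spec_gen_edges gen_edges gen_edges_alt
  rw [List.filter_flatMap]
  apply List.flatMap_congr
  intro a _
  rw [List.filter_map]
  congr 1
  apply List.filter_congr
  intro b _
  simpa using test_eq groups a b
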